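-- pv_equiv track=rewrite | github.com/andersonflima/snippets | crate_tables.py | iter_write_batches
-- ===== SOURCE A (Python) =====
-- import math
-- from typing import Any, Iterator, Sequence
--
-- BATCH_WRITE_LIMIT = 25
--
-- PARTITION_KEY_NAME = "pk"
--
-- PAYLOAD_ATTRIBUTE_NAME = "payload"
--
-- PAYLOAD_FILL_CHARACTER = "x"
--
-- def build_partition_key(table_name: str, item_index: int) -> str:
--     return f"{table_name}#{item_index:08d}"
--
-- def estimate_item_size_bytes(item: dict[str, str]) -> int:
--     return sum(len(key.encode("utf-8")) + len(value.encode("utf-8")) for key, value in item.items())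
--
-- def calculate_item_count(total_bytes: int, max_item_bytes: int) -> int:
--     return max(1, math.ceil(total_bytes / max_item_bytes))
--
-- def iter_item_target_sizes(total_bytes: int, max_item_bytes: int) -> Iterator[int]:
--     item_count = calculate_item_count(total_bytes, max_item_bytes)
--     base_size, remainder = divmod(total_bytes, item_count)
--     for index in range(item_count):
--         yield base_size + (1 if index < remainder else 0)
--
-- def build_item_for_target_size(
--     table_name: str,
--     item_index: int,
--     target_bytes: int,
--     *,
--     partition_key_name: str = PARTITION_KEY_NAME,
--     payload_attribute_name: str = PAYLOAD_ATTRIBUTE_NAME,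
-- ) -> dict[str, str]:
--     item = {
--         partition_key_name: build_partition_key(table_name, item_index),
--         payload_attribute_name: "",
--     }
--     base_size = estimate_item_size_bytes(item)
--     if target_bytes < base_size:
--         raise ValueError(
--             f"nao foi possivel montar um item de {target_bytes} bytes para {table_name}; minimo necessario: {base_size}"
--         )
--     item[payload_attribute_name] = PAYLOAD_FILL_CHARACTER * (target_bytes - base_size)
--     return item
--
-- def iter_write_batches(
--     table_name: str,
--     target_table_bytes: int,
--     max_item_bytes: int,
-- ) -> Iterator[tuple[list[dict[str, str]], int]]:
--     batch_items: list[dict[str, str]] = []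
--     batch_bytes = 0
--
--     for item_index, target_item_bytes in enumerate(
--         iter_item_target_sizes(target_table_bytes, max_item_bytes),
--         start=1,
--     ):
--         batch_items.append(build_item_for_target_size(table_name, item_index, target_item_bytes))
--         batch_bytes += target_item_bytes
--
--         if len(batch_items) != BATCH_WRITE_LIMIT:
--             continue
--
--         yield batch_items, batch_bytes
--         batch_items = []
--         batch_bytes = 0
--
--     if batch_items:
--         yield batch_items, batch_bytes
-- ===== SOURCE B (Python) =====
-- import math
--
-- BATCH_WRITE_LIMIT = 25
-- PARTITION_KEY_NAME = "pk"
-- PAYLOAD_ATTRIBUTE_NAME = "payload"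
-- PAYLOAD_FILL_CHARACTER = "x"
--
--
-- def build_partition_key(table_name, item_index):
--     return f"{table_name}#{item_index:08d}"
--
--
-- def estimate_item_size_bytes(item):
--     return sum(len(key.encode("utf-8")) + len(value.encode("utf-8")) for key, value in item.items())
--
--
-- def calculate_item_count(total_bytes, max_item_bytes):
--     return max(1, math.ceil(total_bytes / max_item_bytes))
--
--
-- def iter_item_target_sizes(total_bytes, max_item_bytes):
--     item_count = calculate_item_count(total_bytes, max_item_bytes)
--     base_size, remainder = divmod(total_bytes, item_count)
--     for index in range(item_count):
--         yield base_size + (1 if index < remainder else 0)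
--
--
-- def build_item_for_target_size(table_name, item_index, target_bytes, *,
--                                partition_key_name=PARTITION_KEY_NAME,
--                                payload_attribute_name=PAYLOAD_ATTRIBUTE_NAME):
--     item = {
--         partition_key_name: build_partition_key(table_name, item_index),
--         payload_attribute_name: "",
--     }
--     base_size = estimate_item_size_bytes(item)
--     if target_bytes < base_size:
--         raise ValueError(
--             f"nao foi possivel montar um item de {target_bytes} bytes para {table_name}; minimo necessario: {base_size}"
--         )
--     item[payload_attribute_name] = PAYLOAD_FILL_CHARACTER * (target_bytes - base_size)
--     return item
--
--
-- def iter_write_batches(table_name, target_table_bytes, max_item_bytes):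
--     # Build the full (item, size) pair list up front, then split it into
--     # BATCH_WRITE_LIMIT-sized slices, summing each slice's sizes.
--     pairs = [
--         (build_item_for_target_size(table_name, index, size), size)
--         for index, size in enumerate(iter_item_target_sizes(target_table_bytes, max_item_bytes), start=1)
--     ]
--     while pairs:
--         chunk, pairs = pairs[:BATCH_WRITE_LIMIT], pairs[BATCH_WRITE_LIMIT:]
--         yield [item for item, _ in chunk], sum(size for _, size in chunk)
-- ===== Notes on version B (the rewrite author's own statement) =====
-- stated objective: alternative
-- what changed: A interleaves batching with generation via running batch_items/batch_bytes accumulators, a len()==LIMIT flush and a trailing flush; B first materialises the whole (item, size) pair list and then splits it into 25-sized slices, summing each slice.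
-- outside the precondition, e.g. on iter_write_batches('t', 10, 0): A raises ZeroDivisionError, B raises ZeroDivisionError; on iter_write_batches('t', 5, 30): A raises ValueError, B raises ValueError
import Mathlib
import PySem

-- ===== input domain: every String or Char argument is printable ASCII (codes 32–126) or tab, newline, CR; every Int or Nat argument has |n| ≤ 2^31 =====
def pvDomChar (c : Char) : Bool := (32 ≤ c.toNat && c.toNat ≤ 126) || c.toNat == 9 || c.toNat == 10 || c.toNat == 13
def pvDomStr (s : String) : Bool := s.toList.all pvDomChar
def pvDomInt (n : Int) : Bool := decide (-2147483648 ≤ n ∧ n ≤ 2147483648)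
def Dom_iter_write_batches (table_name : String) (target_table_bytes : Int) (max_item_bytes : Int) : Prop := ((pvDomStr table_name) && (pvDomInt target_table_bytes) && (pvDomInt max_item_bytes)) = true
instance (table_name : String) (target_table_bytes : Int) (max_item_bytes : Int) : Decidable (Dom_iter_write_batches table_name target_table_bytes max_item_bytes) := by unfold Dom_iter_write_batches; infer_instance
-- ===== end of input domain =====

-- B replaces A's running batch/byte accumulators with "build the full (item, size) pair
-- list, then split it into 25-sized slices, summing each slice" (objective: alternative
-- decomposition, no speed claim). Both are generators in Python; here both ports return
-- the fully consumed list of yielded (batch, bytes) pairs.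

-- ===== PORT A =====
-- shared module helpers (both Pythons use the same module-level helper functions)

-- f"{table_name}#{item_index:08d}" (exact for item_index ≥ 0; indices here start at 1)
def pvBuildPartitionKey (table_name : String) (item_index : Int) : List Char :=
  let s := PySem.Int.toChars item_index
  table_name.toList ++ ['#'] ++ List.replicate (8 - s.length) '0' ++ s

-- estimate_item_size_bytes: sum of utf-8 byte lengths of keys and values;
-- on Dom all characters are ASCII, so byte length = character count (exact there)
def pvItemSize (item : List (List Char × List Char)) : Int :=
  (item.map (fun kv => (kv.1.length : Int) + (kv.2.length : Int))).sum

-- build_item_for_target_size; Python raises ValueError when target < base — those inputs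
-- are excluded by Pre_ below (there the port just emits an empty payload)
def pvBuildItem (table_name : String) (item_index : Int) (target_bytes : Int) : List (String × String) :=
  let pk := pvBuildPartitionKey table_name item_index
  let base := pvItemSize [("pk".toList, pk), ("payload".toList, [])]
  [("pk", String.ofList pk), ("payload", String.ofList (List.replicate (target_bytes - base).toNat 'x'))]

-- math.ceil(total / max): exact ceiling division on Dom (|args| ≤ 2^31 keeps the float
-- division's ceiling exact); max_item_bytes = 0 (Python ZeroDivisionError) excluded by Pre_
def pvItemCount (total_bytes : Int) (max_item_bytes : Int) : Int :=
  max 1 (-(PySem.Int.floordiv (-total_bytes) max_item_bytes))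

-- iter_item_target_sizes, fully consumed
def pvTargetSizes (total_bytes : Int) (max_item_bytes : Int) : List Int :=
  let c := pvItemCount total_bytes max_item_bytes
  let base := PySem.Int.floordiv total_bytes c
  let r := PySem.Int.mod total_bytes c
  (PySem.List.pyRange 0 c 1).map (fun idx => base + (if idx < r then 1 else 0))

-- A: one fold carrying (yielded batches so far, current batch, current byte count),
-- flushing whenever the batch reaches 25, plus a trailing flush
def iter_write_batches (table_name : String) (target_table_bytes : Int) (max_item_bytes : Int) : List ((List (List (String × String))) × Int) :=
  let st := (PySem.List.enumerate (pvTargetSizes target_table_bytes max_item_bytes) 1).foldl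
    (fun (st : List ((List (List (String × String))) × Int) × List (List (String × String)) × Int) p =>
      let items := st.2.1 ++ [pvBuildItem table_name p.1 p.2]
      let bytes := st.2.2 + p.2
      if items.length = 25 then (st.1 ++ [(items, bytes)], ([] : List (List (String × String))), (0 : Int))
      else (st.1, items, bytes))
    (([], [], 0))
  if st.2.1 = ([] : List (List (String × String))) then st.1 else st.1 ++ [(st.2.1, st.2.2)]

-- ===== PORT B =====
-- Source B's `while pairs: chunk, pairs = pairs[:25], pairs[25:]; yield …`
-- (take/drop are exactly Python's nonnegative-bound list slices; List.sum = Python's sum on int)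
def pvChunkBatches : List ((List (String × String)) × Int) → List ((List (List (String × String))) × Int)
  | [] => []
  | p :: ps =>
      (((p :: ps).take 25).map Prod.fst, (((p :: ps).take 25).map Prod.snd).sum)
        :: pvChunkBatches ((p :: ps).drop 25)
termination_by l => l.length
decreasing_by simp [List.length_drop]

def iter_write_batches_alt (table_name : String) (target_table_bytes : Int) (max_item_bytes : Int) : List ((List (List (String × String))) × Int) :=
  let pairs := (PySem.List.enumerate (pvTargetSizes target_table_bytes max_item_bytes) 1).map
    (fun p => (pvBuildItem table_name p.1 p.2, p.2))
  pvChunkBatches pairs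

-- ===== PRECONDITION & SPEC =====
-- Pre_ excludes exactly the inputs where Python A raises: max_item_bytes = 0
-- (ZeroDivisionError) and inputs whose smallest per-item target is below the minimal item
-- size len(table)+10+max(8, digits of the item count) (ValueError from build_item_for_target_size).
def Pre_iter_write_batches (table_name : String) (target_table_bytes : Int) (max_item_bytes : Int) : Prop :=
  max_item_bytes ≠ 0 ∧
  (let c := max 1 (-(PySem.Int.floordiv (-target_table_bytes) max_item_bytes))
   (table_name.toList.length : Int) + 10 + max 8 ((PySem.Int.toChars c).length : Int)
     ≤ PySem.Int.floordiv target_table_bytes c)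
instance (table_name : String) (target_table_bytes : Int) (max_item_bytes : Int) : Decidable (Pre_iter_write_batches table_name target_table_bytes max_item_bytes) := by unfold Pre_iter_write_batches; infer_instance

def pvWitness_iter_write_batches : String × Int × Int := ("t", 100, 30)

def Spec_iter_write_batches (table_name : String) (target_table_bytes : Int) (max_item_bytes : Int) (out : List ((List (List (String × String))) × Int)) : Prop := out = iter_write_batches_alt table_name target_table_bytes max_item_bytes
instance (table_name : String) (target_table_bytes : Int) (max_item_bytes : Int) (out : List ((List (List (String × String))) × Int)) : Decidable (Spec_iter_write_batches table_name target_table_bytes max_item_bytes out) := by unfold Spec_iter_write_batches; infer_instance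

-- ===== CLAIM (what is proved, stated in full; the proofs are below) =====
def Claim_equal_iter_write_batches : Prop := ∀ (table_name : String) (target_table_bytes : Int) (max_item_bytes : Int), Dom_iter_write_batches table_name target_table_bytes max_item_bytes → Pre_iter_write_batches table_name target_table_bytes max_item_bytes → Spec_iter_write_batches table_name target_table_bytes max_item_bytes (iter_write_batches table_name target_table_bytes max_item_bytes)

-- ===== LEMMAS AND PROOFS =====

-- A's loop body, expressed on an already-built (item, size) pair
def pvStep2 (st : List ((List (List (String × String))) × Int) × List (List (String × String)) × Int)
    (q : (List (String × String)) × Int) :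
    List ((List (List (String × String))) × Int) × List (List (String × String)) × Int :=
  let items := st.2.1 ++ [q.1]
  let bytes := st.2.2 + q.2
  if items.length = 25 then (st.1 ++ [(items, bytes)], [], 0) else (st.1, items, bytes)

-- A's trailing flush
def pvFinish (st : List ((List (List (String × String))) × Int) × List (List (String × String)) × Int) :
    List ((List (List (String × String))) × Int) :=
  if st.2.1 = [] then st.1 else st.1 ++ [(st.2.1, st.2.2)]

-- what A's loop produces from a mid-batch state onwards
def pvChunkFrom (items : List (List (String × String))) (bytes : Int) :
    List ((List (String × String)) × Int) → List ((List (List (String × String))) × Int)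
  | [] => if items = [] then [] else [(items, bytes)]
  | q :: qs =>
      if (items ++ [q.1]).length = 25 then (items ++ [q.1], bytes + q.2) :: pvChunkFrom [] 0 qs
      else pvChunkFrom (items ++ [q.1]) (bytes + q.2) qs

lemma pvFoldl_step2 (qs : List ((List (String × String)) × Int))
    (out : List ((List (List (String × String))) × Int))
    (items : List (List (String × String))) (bytes : Int) :
    pvFinish (qs.foldl pvStep2 (out, items, bytes)) = out ++ pvChunkFrom items bytes qs := by
  induction qs generalizing out items bytes with
  | nil =>
      simp only [List.foldl_nil, pvFinish, pvChunkFrom]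
      split_ifs <;> simp
  | cons q qs ih =>
      simp only [List.foldl_cons, pvStep2, pvChunkFrom]
      split_ifs with h
      · rw [ih]; simp
      · rw [ih]

lemma pvChunkFrom_spec (qs : List ((List (String × String)) × Int))
    (items : List (List (String × String))) (bytes : Int) (n : Nat)
    (hn : items.length + n = 25) (hn1 : 1 ≤ n) :
    pvChunkFrom items bytes qs =
      if qs = [] ∧ items = [] then []
      else (items ++ (qs.take n).map Prod.fst, bytes + ((qs.take n).map Prod.snd).sum)
             :: pvChunkBatches (qs.drop n) := by
  induction qs generalizing items bytes n with
  | nil =>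
      by_cases hi : items = [] <;> simp [pvChunkFrom, pvChunkBatches, hi]
  | cons q qs ih =>
      rw [if_neg (by simp)]
      by_cases h : (items ++ [q.1]).length = 25
      · have h24 : items.length = 24 := by simp at h; omega
        have hn' : n = 1 := by omega
        subst hn'
        have hitems : items ≠ [] := by
          intro he; rw [he] at h24; simp at h24
        have htail : pvChunkFrom [] 0 qs = pvChunkBatches qs := by
          rw [ih [] 0 25 (by simp) (by omega)]
          cases qs with
          | nil => simp [pvChunkBatches]
          | cons p ps => simp [pvChunkBatches]
        simp [pvChunkFrom, h, htail]
      · have hn2 : 2 ≤ n := by simp at h; omega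
        simp only [pvChunkFrom, if_neg h]
        rw [ih (items ++ [q.1]) (bytes + q.2) (n - 1) (by simp at h ⊢; omega) (by omega)]
        rw [if_neg (by simp)]
        have htake : (q :: qs).take n = q :: qs.take (n - 1) := by
          cases n with
          | zero => omega
          | succ m => simp
        have hdrop : (q :: qs).drop n = qs.drop (n - 1) := by
          cases n with
          | zero => omega
          | succ m => simp
        simp [htake, hdrop, add_assoc]

lemma pvChunkFrom_nil_eq (qs : List ((List (String × String)) × Int)) :
    pvChunkFrom [] 0 qs = pvChunkBatches qs := by
  rw [pvChunkFrom_spec qs [] 0 25 (by simp) (by omega)]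
  cases qs with
  | nil => simp [pvChunkBatches]
  | cons p ps => simp [pvChunkBatches]

lemma pvFoldl_enum_map (table : String) (ps : List (Int × Int))
    (st : List ((List (List (String × String))) × Int) × List (List (String × String)) × Int) :
    ps.foldl (fun st p => pvStep2 st (pvBuildItem table p.1 p.2, p.2)) st
      = (ps.map (fun p => (pvBuildItem table p.1 p.2, p.2))).foldl pvStep2 st :=
  List.foldl_map.symm

-- ===== VERDICT (by name: the statement is the Claim_ definition above) =====
theorem iter_write_batches_spec : Claim_equal_iter_write_batches := by
  intro table_name target_table_bytes max_item_bytes _ _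
  show iter_write_batches table_name target_table_bytes max_item_bytes
    = iter_write_batches_alt table_name target_table_bytes max_item_bytes
  have key : iter_write_batches table_name target_table_bytes max_item_bytes
      = pvFinish ((PySem.List.enumerate (pvTargetSizes target_table_bytes max_item_bytes) 1).foldl
          (fun st p => pvStep2 st (pvBuildItem table_name p.1 p.2, p.2)) ([], [], 0)) := rfl
  rw [key, pvFoldl_enum_map, pvFoldl_step2, List.nil_append, pvChunkFrom_nil_eq]
  rfl
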